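-- pv_equiv track=rewrite | github.com/Arsenho/2D-Sequence-Alignment | utils.py | ic_matrice_func
-- ===== SOURCE A (Python) =====
-- def del_func(char):
--     return 1
--
-- def ic_matrice_func(y):
--     motif = y
--     assert isinstance(motif, list)
--     assert isinstance(motif[0], str)
--
--     ic_matrix = []
--
--     row = len(motif)
--     column = len(motif[0])
--
--     # Initializing the scores list
--     for i in range(row):
--         inter = []
--         for j in range(column):
--             inter.append(0)
--         ic_matrix.append(inter)
--
--     for i in range(0, row):
--         for j in range(0, column):
--             step = 0
--             for p in range(i):
--                 substring = motif[p][j]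
--                 step += del_func(substring)
--             ic_matrix[i][j] = step
--
--     return ic_matrix
-- ===== SOURCE B (Python) =====
-- def ic_matrice_func(y):
--     assert isinstance(y, list)
--     assert isinstance(y[0], str)
--     column = len(y[0])
--     return [[i] * column for i in range(len(y))]
-- ===== Notes on version B (the rewrite author's own statement) =====
-- stated objective: faster
-- what changed: The inner per-cell loop summing del_func over the previous rows always totals exactly i, so B fills each row directly with [i]*column in one comprehension instead of building a zero matrix and recomputing the running sum for every cell.
import Mathlib
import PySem

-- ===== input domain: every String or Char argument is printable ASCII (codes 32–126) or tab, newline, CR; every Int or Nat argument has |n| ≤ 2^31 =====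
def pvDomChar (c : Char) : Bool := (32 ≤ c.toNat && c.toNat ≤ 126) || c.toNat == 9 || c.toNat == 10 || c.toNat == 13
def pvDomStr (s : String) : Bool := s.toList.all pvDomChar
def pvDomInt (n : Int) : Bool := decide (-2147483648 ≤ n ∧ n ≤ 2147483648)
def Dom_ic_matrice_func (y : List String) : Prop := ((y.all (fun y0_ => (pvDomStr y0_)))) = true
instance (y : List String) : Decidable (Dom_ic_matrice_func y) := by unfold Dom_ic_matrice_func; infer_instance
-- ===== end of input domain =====

-- B replaces A's per-cell inner loop (whose sum is always the row index i) by writing [i]*column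
-- rows directly: O(row*column) instead of O(row^2*column).

-- ===== PORT A =====
def del_func (_char : Option Char) : Int := 1

def ic_matrice_func (y : List String) : List (List Int) :=
  let motif := y
  let row : Int := (motif.length : Int)
  let column : Int := PySem.Str.len ((PySem.List.pyGet? motif 0).getD "")
  -- Initializing the scores list
  let ic0 : List (List Int) :=
    (PySem.List.pyRange 0 row 1).foldl (fun ic_matrix _i =>
      let inter := (PySem.List.pyRange 0 column 1).foldl (fun inter _j => inter ++ [(0 : Int)]) []
      ic_matrix ++ [inter]) []
  (PySem.List.pyRange 0 row 1).foldl (fun ic_matrix i =>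
    (PySem.List.pyRange 0 column 1).foldl (fun ic_matrix j =>
      let step : Int :=
        (PySem.List.pyRange 0 i 1).foldl (fun step p =>
          let substring := PySem.Str.pyGet? (PySem.List.pyGetD motif p "") j
          step + del_func substring) 0
      PySem.List.pySetD ic_matrix i
        (PySem.List.pySetD (PySem.List.pyGetD ic_matrix i []) j step)) ic_matrix) ic0

-- ===== PORT B =====
def ic_matrice_func_alt (y : List String) : List (List Int) :=
  let column : Int := PySem.Str.len ((PySem.List.pyGet? y 0).getD "")
  (PySem.List.pyRange 0 (y.length : Int) 1).map (fun i => PySem.List.pyRepeat [i] column)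

-- ===== PRECONDITION & SPEC =====
-- Pre_ excludes exactly the inputs on which Python A raises: the empty list (IndexError at
-- motif[0]) and non-empty lists where a string before the last is shorter than y[0]
-- (IndexError at motif[p][j]).
def Pre_ic_matrice_func (y : List String) : Prop :=
  y ≠ [] ∧ ∀ s ∈ y.dropLast, (y.headD "").toList.length ≤ s.toList.length
instance (y : List String) : Decidable (Pre_ic_matrice_func y) := by
  unfold Pre_ic_matrice_func; infer_instance

def pvWitness_ic_matrice_func : List String := ["ab", "cd", "ef"]

def Spec_ic_matrice_func (y : List String) (out : List (List Int)) : Prop := out = ic_matrice_func_alt y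
instance (y : List String) (out : List (List Int)) : Decidable (Spec_ic_matrice_func y out) := by unfold Spec_ic_matrice_func; infer_instance

-- ===== CLAIM (what is proved, stated in full; the proofs are below) =====
def Claim_equal_ic_matrice_func : Prop := ∀ (y : List String), Dom_ic_matrice_func y → Pre_ic_matrice_func y → Spec_ic_matrice_func y (ic_matrice_func y)
-- ===== LEMMAS AND PROOFS =====
theorem fold_inc (l : List Int) (f : Int → Option Char) : ∀ (a : Int),
    l.foldl (fun step p => step + del_func (f p)) a = a + l.length := by
  induction l with
  | nil => intro a; simp
  | cons x t ih =>
    intro a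
    rw [List.foldl_cons, ih]
    simp only [del_func, List.length_cons]
    push_cast; ring
theorem step_fold_eq (motif : List String) (i : Int) (h : 0 ≤ i) (j : Int) :
    (PySem.List.pyRange 0 i 1).foldl (fun step p =>
      step + del_func (PySem.Str.pyGet? (PySem.List.pyGetD motif p "") j)) 0 = i := by
  rw [fold_inc]
  rw [PySem.List.length_pyRange_one]
  omega

theorem fold_set_cons (v h : Int) : ∀ (l : List Nat) (t : List Int),
    l.foldl (fun m j => m.set (j + 1) v) (h :: t) = h :: l.foldl (fun m j => m.set j v) t := by
  intro l
  induction l with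
  | nil => intro t; rfl
  | cons x xs ih => intro t; simp [List.foldl_cons, ih]

theorem row_fill (v : Int) : ∀ (r : List Int),
    (List.range r.length).foldl (fun r j => r.set j v) r = List.replicate r.length v := by
  intro r
  induction r with
  | nil => rfl
  | cons a t ih =>
    rw [List.length_cons, List.range_succ_eq_map, List.foldl_cons]
    show ((List.range t.length).map Nat.succ).foldl (fun m j => m.set j v) (v :: t) = _
    rw [List.foldl_map]
    simp only [Nat.succ_eq_add_one]
    rw [fold_set_cons, ih, List.replicate_succ]


theorem fold_set_row (v : Int) : ∀ (l : List Nat) (ic : List (List Int)) (k : Nat),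
    k < ic.length →
    l.foldl (fun m j => m.set k ((m.getD k []).set j v)) ic
      = ic.set k (l.foldl (fun r j => r.set j v) (ic.getD k [])) := by
  intro l
  induction l with
  | nil =>
    intro ic k hk
    rw [List.foldl_nil, List.foldl_nil, List.getD_eq_getElem ic [] hk, List.set_getElem_self hk]
  | cons x xs ih =>
    intro ic k hk
    rw [List.foldl_cons, List.foldl_cons, List.getD_eq_getElem ic [] hk]
    rw [ih (ic.set k (ic[k].set x v)) k (by simpa using hk)]
    rw [List.getD_eq_getElem (ic.set k (ic[k].set x v)) [] (by simpa using hk)]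
    rw [List.getElem_set_self (by simpa using hk), List.set_set]

theorem inner_loop_eq (c : Nat) (v : Int) (ic : List (List Int)) (k : Nat)
    (hk : k < ic.length) (hrow : ic.getD k [] = List.replicate c 0) :
    (PySem.List.pyRange 0 (c : Int) 1).foldl (fun m j =>
      PySem.List.pySetD m (k : Int)
        (PySem.List.pySetD (PySem.List.pyGetD m (k : Int) []) j v)) ic
    = ic.set k (List.replicate c v) := by
  rw [PySem.List.pyRange_zero_natCast, List.foldl_map]
  simp only [PySem.List.pySetD_natCast, PySem.List.pyGetD_natCast]
  rw [fold_set_row v (List.range c) ic k hk, hrow]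
  have := row_fill v (List.replicate c (0 : Int))
  rw [List.length_replicate] at this
  rw [this]

theorem set_append_mid {α : Type} (v x : α) : ∀ (l1 rest : List α),
    (l1 ++ x :: rest).set l1.length v = l1 ++ v :: rest := by
  intro l1
  induction l1 with
  | nil => intro rest; rfl
  | cons a t ih => intro rest; simp [List.set_cons_succ, ih]

theorem getD_append_mid {α : Type} (d x : α) : ∀ (l1 rest : List α),
    (l1 ++ x :: rest).getD l1.length d = x := by
  intro l1
  induction l1 with
  | nil => intro rest; rfl
  | cons a t ih => intro rest; simpa using ih rest

theorem outer_loop (c : Nat) : ∀ (d k : Nat) (pre : List (List Int)), pre.length = k →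
    (PySem.List.pyRange (k : Int) ((k + d : Nat) : Int) 1).foldl
      (fun m i => (PySem.List.pyRange 0 (c : Int) 1).foldl
        (fun m j => PySem.List.pySetD m i
          (PySem.List.pySetD (PySem.List.pyGetD m i []) j i)) m)
      (pre ++ List.replicate d (List.replicate c 0))
    = pre ++ (PySem.List.pyRange (k : Int) ((k + d : Nat) : Int) 1).map
        (fun i => List.replicate c i) := by
  intro d
  induction d with
  | zero =>
    intro k pre hpre
    rw [PySem.List.pyRange_one_eq_nil (a := (k : Int)) (b := ((k + 0 : Nat) : Int)) (by push_cast; omega)]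
    simp
  | succ d ih =>
    intro k pre hpre
    subst hpre
    rw [PySem.List.pyRange_one_cons (a := (pre.length : Int))
      (b := ((pre.length + (d + 1) : Nat) : Int)) (by push_cast; omega),
      List.foldl_cons, List.map_cons]
    rw [List.replicate_succ, inner_loop_eq c ((pre.length : Nat) : Int) _ pre.length
      (by simp) (by rw [getD_append_mid])]
    rw [set_append_mid]
    have hcast : ((pre.length + (d + 1) : Nat) : Int) = (((pre.length + 1) + d : Nat) : Int) := by
      push_cast; ring
    have hk1 : ((pre.length : Int) + 1) = ((pre.length + 1 : Nat) : Int) := by push_cast; ring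
    rw [hcast, hk1]
    have h2 := ih (pre.length + 1) (pre ++ [List.replicate c (pre.length : Int)]) (by simp)
    rw [show pre ++ [List.replicate c (pre.length : Int)] ++ List.replicate d (List.replicate c 0)
        = pre ++ (List.replicate c (pre.length : Int) :: List.replicate d (List.replicate c 0))
      by simp] at h2
    rw [h2]
    simp

-- ===== VERDICT (by name: the statement is the Claim_ definition above) =====
theorem ic_matrice_func_spec : Claim_equal_ic_matrice_func := by
  intro y _ hpre
  obtain ⟨h0, t, rfl⟩ := List.exists_cons_of_ne_nil hpre.1
  unfold Spec_ic_matrice_func ic_matrice_func ic_matrice_func_alt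
  have hget : (PySem.List.pyGet? (h0 :: t) 0).getD "" = h0 := by
    simp [PySem.List.pyGet?, PySem.List.pyIdx?]
  simp only [hget, PySem.Str.len_eq, PySem.List.foldl_append_singleton_eq_map,
    List.map_const', PySem.List.length_pyRange_one, PySem.List.pyRepeat_singleton,
    List.nil_append, Int.sub_zero, Int.toNat_natCast]
  rw [PySem.List.foldl_congr_mem (PySem.List.pyRange 0 (((h0 :: t).length : Nat) : Int) 1) _
    (fun m i => (PySem.List.pyRange 0 ((h0.toList.length : Nat) : Int) 1).foldl
        (fun m j => PySem.List.pySetD m i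
          (PySem.List.pySetD (PySem.List.pyGetD m i []) j i)) m)
    (List.replicate (h0 :: t).length (List.replicate h0.toList.length 0))
    (by
      intro acc x hx
      have hx0 : (0 : Int) ≤ x := (PySem.List.mem_pyRange_one.mp hx).1
      simp only [step_fold_eq (h0 :: t) x hx0])]
  simpa using outer_loop h0.toList.length (h0 :: t).length 0 [] rfl
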